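-- pv_equiv track=rewrite | github.com/devkami/kami-pricing-analytics | kami_pricing_analytics/data_collector/strategies/web_scraping/mercado_libre.py | _clean_product_description
-- ===== SOURCE A (Python) =====
-- class MercadoLibreScraperException(Exception):
--     """
--     Custom exception class for MercadoLibreScraper-related errors.
--     """
--
--     pass
--
-- def _clean_product_description(product_description: str) -> str:
--     """
--     Cleans and normalizes the product description for consistent processing.
--
--     Args:
--         product_description (str): The raw product description.
--
--     Returns:
--         str: The cleaned product description.
--
--     Raises:
--         MercadoLibreScraperException: If an error occurs while cleaning the product description.
--     """
--     try:
--         product_description = product_description.lower()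
--         product_description = ''.join(
--             e for e in product_description if e.isalnum() or e.isspace()
--         )
--         product_description = ' '.join(product_description.split())
--     except Exception as e:
--         raise MercadoLibreScraperException(
--             f'Error while cleaning product description: {e}'
--         )
--
--     return product_description
-- ===== SOURCE B (Python) =====
-- class MercadoLibreScraperException(Exception):
--     """
--     Custom exception class for MercadoLibreScraper-related errors.
--     """
--
--     pass
--
--
-- def _clean_product_description(product_description: str) -> str:
--     """Single-pass tokenizer: build words char by char instead of
--     filter-join followed by split-join."""
--     try:
--         words = []
--         buf = []
--         for ch in product_description.lower():
--             if ch.isalnum():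
--                 buf.append(ch)
--             elif ch.isspace():
--                 if buf:
--                     words.append(''.join(buf))
--                     buf = []
--             # any other character is dropped without ending the word
--         if buf:
--             words.append(''.join(buf))
--         return ' '.join(words)
--     except Exception as e:
--         raise MercadoLibreScraperException(
--             f'Error while cleaning product description: {e}'
--         )
-- ===== Notes on version B (the rewrite author's own statement) =====
-- stated objective: alternative
-- what changed: Replaced the three chained whole-string passes (lower, filter-join, split-join) by one token-building traversal that appends alnum chars to a word buffer, flushes it on whitespace and silently drops other chars.
import Mathlib
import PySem

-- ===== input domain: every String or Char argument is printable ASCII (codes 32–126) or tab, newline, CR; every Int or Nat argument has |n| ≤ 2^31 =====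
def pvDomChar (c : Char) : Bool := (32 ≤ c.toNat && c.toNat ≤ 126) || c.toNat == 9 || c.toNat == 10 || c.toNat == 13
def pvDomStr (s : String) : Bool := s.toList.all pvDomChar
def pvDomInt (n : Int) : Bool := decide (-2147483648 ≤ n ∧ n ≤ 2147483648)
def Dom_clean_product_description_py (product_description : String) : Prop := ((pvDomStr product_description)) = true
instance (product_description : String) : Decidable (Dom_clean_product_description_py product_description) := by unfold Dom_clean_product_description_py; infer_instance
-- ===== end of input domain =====

-- B is an alternative single-pass tokenizer; A's chained passes (the try/except never fires: cleaning is total).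

-- ===== PORT A =====
-- A: lower, then ''.join(e for e in s if e.isalnum() or e.isspace()), then ' '.join(s.split())
def clean_product_description_py (product_description : String) : String :=
  let s1 := PySem.Str.lower product_description
  let s2 := String.ofList (s1.toList.filter (fun e => PySem.Chars.isalnum e || PySem.Chars.isspace e))
  PySem.Str.join " " (PySem.Str.split₀ s2)

-- ===== PORT B =====
-- B's loop: append alnum chars to buf, flush buf to words on whitespace, drop other chars
def cpdGo : List Char → List Char → List (List Char) → List (List Char)
  | [], buf, words => if buf.isEmpty then words else words ++ [buf]
  | c :: rest, buf, words =>
    if PySem.Chars.isalnum c then cpdGo rest (buf ++ [c]) words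
    else if PySem.Chars.isspace c then
      (if buf.isEmpty then cpdGo rest [] words else cpdGo rest [] (words ++ [buf]))
    else cpdGo rest buf words

def clean_product_description_py_alt (product_description : String) : String :=
  PySem.Str.join " " ((cpdGo (PySem.Str.lower product_description).toList [] []).map String.ofList)

-- ===== PRECONDITION & SPEC =====
def Spec_clean_product_description_py (product_description : String) (out : String) : Prop := out = clean_product_description_py_alt product_description
instance (product_description : String) (out : String) : Decidable (Spec_clean_product_description_py product_description out) := by unfold Spec_clean_product_description_py; infer_instance

-- ===== CLAIM (what is proved, stated in full; the proofs are below) =====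
def Claim_equal_clean_product_description_py : Prop := ∀ (product_description : String), Dom_clean_product_description_py product_description → Spec_clean_product_description_py product_description (clean_product_description_py product_description)

-- ===== LEMMAS AND PROOFS =====

lemma cpd_alnum_not_space (c : Char) (h : PySem.Chars.isalnum c = true) :
    PySem.Chars.isspace c = false := by
  simp [PySem.Chars.isalnum, PySem.Chars.isalpha, PySem.Chars.isdigit, PySem.Chars.isupper,
    PySem.Chars.islower, PySem.Chars.isspace, Char.le_def, UInt32.le_iff_toNat_le] at *
  omega

lemma cpd_key (cs : List Char) : ∀ (cur : List Char) (acc : List (List Char)),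
    PySem.Chars.split₀.go (cs.filter (fun e => PySem.Chars.isalnum e || PySem.Chars.isspace e)) cur acc
      = cpdGo cs cur.reverse acc.reverse := by
  induction cs with
  | nil =>
    intro cur acc
    rcases cur with _ | ⟨c, cur⟩ <;> simp [PySem.Chars.split₀.go, cpdGo]
  | cons c rest ih =>
    intro cur acc
    by_cases ha : PySem.Chars.isalnum c = true
    · have hs := cpd_alnum_not_space c ha
      simp [ha, hs, PySem.Chars.split₀.go, cpdGo, ih (c :: cur) acc]
    · by_cases hs : PySem.Chars.isspace c = true
      · simp only [List.filter_cons, ha, hs, Bool.or_true, if_pos,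
          PySem.Chars.split₀.go, cpdGo]
        rcases cur with _ | ⟨d, cur⟩
        · simpa using ih [] acc
        · simp only [List.isEmpty_cons, List.reverse_cons]
          have := ih [] ((d :: cur).reverse :: acc)
          simpa [cpdGo] using this
      · simp [ha, hs, cpdGo, ih cur acc]

-- ===== VERDICT (by name: the statement is the Claim_ definition above) =====
theorem clean_product_description_py_spec : Claim_equal_clean_product_description_py := by
  intro s _
  unfold Spec_clean_product_description_py clean_product_description_py clean_product_description_py_alt
  simp only [PySem.Str.join, PySem.Str.split₀, PySem.Chars.split₀]
  have h := cpd_key (PySem.Chars.lower s.toList) [] []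
  simp only [List.reverse_nil] at h
  simp only [PySem.Str.lower, String.toList_ofList] at *
  rw [h]
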